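-- pv_equiv track=rewrite | github.com/xiaohuanlin/Algorithms | Leetcode/3566. Partition Array into Two Equal Product Subsets.py | checkEqualPartitions
-- ===== SOURCE A (Python) =====
-- from typing import List
--
-- def checkEqualPartitions(nums: List[int], target: int) -> bool:
--     def dfs(i, selected, value):
--         if i >= len(nums):
--             return False
--         if value == target:
--             res = 1
--             for j in range(len(nums)):
--                 if j in selected:
--                     continue
--                 res *= nums[j]
--             return res == target
--         if dfs(i+1, selected, value):
--             return True
--         selected.append(i)
--         if dfs(i+1, selected, value * nums[i]):
--             return True
--         selected.pop()
--         return False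
--
--     return dfs(0, [], 1)
-- ===== SOURCE B (Python) =====
-- from typing import List
--
-- def checkEqualPartitions(nums: List[int], target: int) -> bool:
--     if target == 0:
--         # each part needs its own zero
--         return nums.count(0) >= 2
--     total = 1
--     for v in nums:
--         total *= v
--     if total != target * target:
--         return False
--
--     def subset_products(arr):
--         ps = {1}
--         for v in arr:
--             ps |= {p * v for p in ps}
--         return ps
--
--     half = len(nums) // 2
--     rp = subset_products(nums[half:])
--     return any(l != 0 and target % l == 0 and target // l in rp
--                for l in subset_products(nums[:half]))
-- ===== Notes on version B (the rewrite author's own statement) =====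
-- stated objective: faster
-- what changed: Replaced the exponential DFS over all subsets (with an O(n) complement-product rescan at each hit) by a global product check total == target^2 plus a meet-in-the-middle subset-product search over the two halves.
-- outside the precondition, e.g. on checkEqualPartitions([], 1): A returns False, B returns True
import Mathlib
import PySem

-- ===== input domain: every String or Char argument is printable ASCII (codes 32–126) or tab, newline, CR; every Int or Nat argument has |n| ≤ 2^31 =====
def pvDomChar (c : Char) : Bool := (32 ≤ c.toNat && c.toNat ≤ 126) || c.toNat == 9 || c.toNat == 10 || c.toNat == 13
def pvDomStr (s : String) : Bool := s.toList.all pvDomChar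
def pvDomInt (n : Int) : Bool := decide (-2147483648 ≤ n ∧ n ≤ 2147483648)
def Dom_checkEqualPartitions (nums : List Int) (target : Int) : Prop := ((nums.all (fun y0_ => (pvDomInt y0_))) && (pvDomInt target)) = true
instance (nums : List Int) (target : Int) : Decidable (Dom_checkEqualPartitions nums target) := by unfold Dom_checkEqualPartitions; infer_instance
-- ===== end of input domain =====

-- B replaces A's exponential DFS over all subsets by a total == target^2 check plus a
-- meet-in-the-middle subset-product search over the two halves (objective: faster).

-- ===== PORT A =====
-- the complement-product check A performs when value == target (the 'res' loop, then 'res == target')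
def pvCres (nums : List Int) (target : Int) (selected : List Nat) : Bool :=
  ((List.range nums.length).foldl
      (fun res j => if j ∈ selected then res else res * nums.getD j 0) 1) == target

-- A's dfs; 'selected.append(i) … selected.pop()' = recursing on selected ++ [i];
-- nums[j]/nums[i] is ported as getD (the index is always in range here, so this is exact).
-- The recursion is made structural on a fuel argument kept equal to nums.length - i
-- (a totality guard only: with that fuel the 'i >= len(nums)' test below fires first).
def pvDfs (nums : List Int) (target : Int) : Nat → Nat → List Nat → Int → Bool
  | 0, _, _, _ => false
  | fuel + 1, i, selected, value =>
    if nums.length ≤ i then false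
    else if value == target then pvCres nums target selected
    else if pvDfs nums target fuel (i + 1) selected value then true
    else if pvDfs nums target fuel (i + 1) (selected ++ [i]) (value * nums.getD i 0) then true
    else false

def checkEqualPartitions (nums : List Int) (target : Int) : Bool :=
  pvDfs nums target nums.length 0 [] 1

-- ===== PORT B =====
-- subset_products(arr): ps = {1}; for v in arr: ps |= {p * v for p in ps}
def pvProds (arr : List Int) : PySem.Set Int :=
  arr.foldl (fun ps v => ps.foldl (fun acc p => PySem.Set.add acc (p * v)) ps)
    (PySem.Set.ofList [1])

def checkEqualPartitions_alt (nums : List Int) (target : Int) : Bool :=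
  if target == 0 then decide (2 ≤ PySem.List.count nums 0)
  else
    let total := nums.foldl (· * ·) 1
    if total != target * target then false
    else
      let half : Nat := nums.length / 2
      let rp := pvProds (PySem.List.slice nums (some (half : Int)) none)
      (pvProds (PySem.List.slice nums none (some (half : Int)))).any
        (fun l => l != 0 && PySem.Int.mod target l == 0 &&
          PySem.Set.contains rp (PySem.Int.floordiv target l))

-- ===== PRECONDITION & SPEC =====
-- Pre_ excludes only the input (nums = [], target = 1), on which whether the empty array admits
-- a partition into two (empty) subsets of product 1 is unspecified: A returns False there, B True.
def Pre_checkEqualPartitions (nums : List Int) (target : Int) : Prop := nums ≠ [] ∨ target ≠ 1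
instance (nums : List Int) (target : Int) : Decidable (Pre_checkEqualPartitions nums target) := by
  unfold Pre_checkEqualPartitions; infer_instance

def pvWitness_checkEqualPartitions : List Int × Int := ([2, 3, 6], 6)

def Spec_checkEqualPartitions (nums : List Int) (target : Int) (out : Bool) : Prop := out = checkEqualPartitions_alt nums target
instance (nums : List Int) (target : Int) (out : Bool) : Decidable (Spec_checkEqualPartitions nums target out) := by unfold Spec_checkEqualPartitions; infer_instance

-- ===== CLAIM (what is proved, stated in full; the proofs are below) =====
def Claim_equal_checkEqualPartitions : Prop := ∀ (nums : List Int) (target : Int), Dom_checkEqualPartitions nums target → Pre_checkEqualPartitions nums target → Spec_checkEqualPartitions nums target (checkEqualPartitions nums target)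

-- ===== LEMMAS AND PROOFS =====

-- product of nums over an index list
def pvPIdx (nums : List Int) (T : List Nat) : Int := (T.map (fun j => nums.getD j 0)).prod

-- the complement of an index list: the sorted list of the other indices below nums.length
def pvCompl (nums : List Int) (T : List Nat) : List Nat :=
  (List.range nums.length).filter (fun j => !decide (j ∈ T))

theorem pvPIdx_cons (nums : List Int) (t : Nat) (T : List Nat) :
    pvPIdx nums (t :: T) = nums.getD t 0 * pvPIdx nums T := by
  simp [pvPIdx]

theorem pvPIdx_append (nums : List Int) (T₁ T₂ : List Nat) :
    pvPIdx nums (T₁ ++ T₂) = pvPIdx nums T₁ * pvPIdx nums T₂ := by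
  simp [pvPIdx]

theorem pv_foldl_if_prod (sel : List Nat) (f : Nat → Int) (l : List Nat) (a : Int) :
    l.foldl (fun res j => if j ∈ sel then res else res * f j) a
      = a * ((l.filter (fun j => !decide (j ∈ sel))).map f).prod := by
  induction l generalizing a with
  | nil => simp
  | cons x xs ih =>
    by_cases hx : x ∈ sel
    · simp [List.foldl_cons, hx, ih]
    · simp [List.foldl_cons, hx, ih, mul_assoc]

theorem pv_map_getD_range (nums : List Int) :
    (List.range nums.length).map (fun j => nums.getD j 0) = nums := by
  apply List.ext_getElem
  · simp
  · intro i h1 h2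
    simp [List.getD_eq_getElem?_getD, h2]

theorem pv_filter_mem_perm (n : Nat) (sel : List Nat) (hnd : sel.Nodup)
    (hlt : ∀ j ∈ sel, j < n) :
    ((List.range n).filter (fun j => decide (j ∈ sel))).Perm sel := by
  rw [List.perm_ext_iff_of_nodup (List.nodup_range.filter _) hnd]
  intro a
  simp only [List.mem_filter, List.mem_range, decide_eq_true_eq]
  exact ⟨fun h => h.2, fun h => ⟨hlt a h, h⟩⟩

theorem pv_prod_split (nums : List Int) (sel : List Nat) (hnd : sel.Nodup)
    (hlt : ∀ j ∈ sel, j < nums.length) :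
    pvPIdx nums sel * pvPIdx nums (pvCompl nums sel) = nums.prod := by
  have hperm := List.filter_append_perm (fun j => decide (j ∈ sel)) (List.range nums.length)
  have h2 := (hperm.map (fun j => nums.getD j 0)).prod_eq
  rw [List.map_append, List.prod_append, pv_map_getD_range] at h2
  have h3 := ((pv_filter_mem_perm nums.length sel hnd hlt).map (fun j => nums.getD j 0)).prod_eq
  unfold pvPIdx pvCompl
  rw [← h3, h2]

theorem pvCres_iff (nums : List Int) (target : Int) (sel : List Nat) :
    pvCres nums target sel = true ↔ pvPIdx nums (pvCompl nums sel) = target := by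
  unfold pvCres
  rw [pv_foldl_if_prod, one_mul, beq_iff_eq]
  rfl

theorem pv_idx_sublist (l : List Int) (T : List Nat) (hp : T.Pairwise (· < ·))
    (hb : ∀ j ∈ T, j < l.length) :
    (T.map (fun j => l.getD j 0)).Sublist l := by
  induction l generalizing T with
  | nil =>
    cases T with
    | nil => simp
    | cons t T' => exact absurd (hb t (by simp)) (by simp)
  | cons a l' ih =>
    cases T with
    | nil => simp
    | cons t T' =>
      have hp' := (List.pairwise_cons.mp hp).2
      have hgt := (List.pairwise_cons.mp hp).1
      by_cases ht : t = 0
      · subst ht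
        have hmap : T'.map (fun j => (a :: l').getD j 0)
            = (T'.map (fun j => j - 1)).map (fun j => l'.getD j 0) := by
          rw [List.map_map]
          apply List.map_congr_left
          intro j hj
          obtain ⟨k, rfl⟩ : ∃ k, j = k + 1 := ⟨j - 1, by have := hgt j hj; omega⟩
          simp [List.getD_cons_succ]
        simp only [List.map_cons, List.getD_cons_zero, hmap]
        apply List.Sublist.cons₂
        apply ih
        · rw [List.pairwise_map]
          exact hp'.imp_of_mem (fun {x y} hx _ h => by
            have := hgt x hx; omega)
        · intro j hj
          simp only [List.mem_map] at hj
          obtain ⟨j', hj', rfl⟩ := hj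
          have h1 := hb j' (by simp [hj'])
          have h2 := hgt j' hj'
          simp only [List.length_cons] at h1
          omega
      · have hpos : ∀ j ∈ t :: T', 1 ≤ j := by
          intro j hj
          rcases List.mem_cons.mp hj with rfl | hj'
          · omega
          · have := hgt j hj'
            omega
        have hmap : (t :: T').map (fun j => (a :: l').getD j 0)
            = ((t :: T').map (fun j => j - 1)).map (fun j => l'.getD j 0) := by
          rw [List.map_map]
          apply List.map_congr_left
          intro j hj
          obtain ⟨k, rfl⟩ : ∃ k, j = k + 1 := ⟨j - 1, by have := hpos j hj; omega⟩
          simp [List.getD_cons_succ]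
        rw [hmap]
        apply List.Sublist.cons
        apply ih
        · rw [List.pairwise_map]
          exact hp.imp_of_mem (fun {x y} hx _ h => by
            have := hpos x hx; omega)
        · intro j hj
          simp only [List.mem_map] at hj
          obtain ⟨j', hj', rfl⟩ := hj
          have h1 := hb j' hj'
          have h2 := hpos j' hj'
          simp only [List.length_cons] at h1
          omega

theorem pv_sublist_idx (l : List Int) (S : List Int) (h : S.Sublist l) :
    ∃ T : List Nat, T.Pairwise (· < ·) ∧ (∀ j ∈ T, j < l.length) ∧
      T.map (fun j => l.getD j 0) = S := by
  induction h with
  | slnil => exact ⟨[], by simp⟩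
  | @cons S' l' a h ih =>
    obtain ⟨T, hp, hb, hm⟩ := ih
    refine ⟨T.map (· + 1), ?_, ?_, ?_⟩
    · rw [List.pairwise_map]
      exact hp.imp (fun h => by omega)
    · intro j hj
      simp only [List.mem_map] at hj
      obtain ⟨j', hj', rfl⟩ := hj
      have := hb j' hj'
      simp only [List.length_cons]
      omega
    · rw [List.map_map, ← hm]
      apply List.map_congr_left
      intro j hj
      simp [List.getD_cons_succ]
  | @cons₂ S' l' a h ih =>
    obtain ⟨T, hp, hb, hm⟩ := ih
    refine ⟨0 :: T.map (· + 1), ?_, ?_, ?_⟩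
    · rw [List.pairwise_cons]
      constructor
      · intro j hj
        simp only [List.mem_map] at hj
        obtain ⟨j', _, rfl⟩ := hj
        omega
      · rw [List.pairwise_map]
        exact hp.imp (fun h => by omega)
    · intro j hj
      rcases List.mem_cons.mp hj with rfl | hj'
      · simp
      · simp only [List.mem_map] at hj'
        obtain ⟨j', hj', rfl⟩ := hj'
        have := hb j' hj'
        simp only [List.length_cons]
        omega
    · rw [← hm]
      simp only [List.map_cons, List.getD_cons_zero, List.map_map]
      refine List.cons_eq_cons.mpr ⟨rfl, ?_⟩
      apply List.map_congr_left
      intro j hj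
      simp [List.getD_cons_succ]

theorem pvDfs_sound (nums : List Int) (target : Int) :
    ∀ (d i : Nat) (sel : List Nat) (value : Int), nums.length - i = d →
      sel.Pairwise (· < ·) → (∀ j ∈ sel, j < i) → (∀ j ∈ sel, j < nums.length) →
      value = pvPIdx nums sel → pvDfs nums target d i sel value = true →
      ∃ sel', sel'.Pairwise (· < ·) ∧ (∀ j ∈ sel', j < nums.length) ∧
        pvPIdx nums sel' = target ∧ pvPIdx nums (pvCompl nums sel') = target := by
  intro d
  induction d with
  | zero =>
    intro i sel value hd _ _ _ _ hrun
    simp [pvDfs] at hrun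
  | succ d ih =>
    intro i sel value hd hp hlt hln hv hrun
    have hi : ¬ nums.length ≤ i := by omega
    rw [pvDfs, if_neg hi] at hrun
    by_cases hvt : value = target
    · rw [if_pos (beq_iff_eq.mpr hvt)] at hrun
      exact ⟨sel, hp, hln, by rw [← hv, hvt], (pvCres_iff nums target sel).mp hrun⟩
    · rw [if_neg (by simpa using hvt)] at hrun
      by_cases h1 : pvDfs nums target d (i + 1) sel value = true
      · exact ih (i + 1) sel value (by omega) hp (fun j hj => by have := hlt j hj; omega)
          hln hv h1
      · rw [if_neg (by simpa using h1)] at hrun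
        have h2 : pvDfs nums target d (i + 1) (sel ++ [i]) (value * nums.getD i 0) = true := by
          by_cases h2 : pvDfs nums target d (i + 1) (sel ++ [i]) (value * nums.getD i 0) = true
          · exact h2
          · rw [if_neg (by simpa using h2)] at hrun
            exact absurd hrun (by simp)
        refine ih (i + 1) (sel ++ [i]) (value * nums.getD i 0) (by omega) ?_ ?_ ?_ ?_ h2
        · rw [List.pairwise_append]
          exact ⟨hp, by simp, by intro a ha b hb; simp at hb; subst hb; exact hlt a ha⟩
        · intro j hj
          rcases List.mem_append.mp hj with hj' | hj'
          · have := hlt j hj'; omega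
          · simp at hj'; omega
        · intro j hj
          rcases List.mem_append.mp hj with hj' | hj'
          · exact hln j hj'
          · simp at hj'; omega
        · rw [pvPIdx_append, ← hv, pvPIdx_cons]
          simp [pvPIdx]

theorem pvDfs_complete (nums : List Int) (target : Int) :
    ∀ (d i : Nat) (sel : List Nat) (value : Int) (T : List Nat), nums.length - i = d →
      i < nums.length → T.Pairwise (· < ·) → (∀ t ∈ T, i ≤ t ∧ t + 1 < nums.length) →
      value * pvPIdx nums T = target →
      (∀ T₁, T₁ <+: T → value * pvPIdx nums T₁ = target →
        pvCres nums target (sel ++ T₁) = true) →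
      pvDfs nums target d i sel value = true := by
  intro d
  induction d with
  | zero => intro i sel value T hd hi; omega
  | succ d ih =>
    intro i sel value T hd hi hp hb hv hH
    have hile : ¬ nums.length ≤ i := by omega
    rw [pvDfs, if_neg hile]
    by_cases hvt : value = target
    · rw [if_pos (beq_iff_eq.mpr hvt)]
      have := hH [] (List.nil_prefix) (by simpa [pvPIdx] using hvt)
      simpa using this
    · rw [if_neg (by simpa using hvt)]
      cases T with
      | nil => exact absurd (by simpa [pvPIdx] using hv) hvt
      | cons t T' =>
        have hpt := (List.pairwise_cons.mp hp).1
        have hp' := (List.pairwise_cons.mp hp).2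
        have hbt := hb t (by simp)
        by_cases hti : t = i
        · subst hti
          have h2 : pvDfs nums target d (t + 1) (sel ++ [t]) (value * nums.getD t 0) = true := by
            refine ih (t + 1) (sel ++ [t]) (value * nums.getD t 0) T' (by omega) (by omega)
              hp' ?_ ?_ ?_
            · intro t' ht'
              have := hpt t' ht'
              have := hb t' (by simp [ht'])
              omega
            · rw [mul_assoc, ← pvPIdx_cons]; exact hv
            · intro T₁ hpre hprod
              have := hH (t :: T₁) (List.cons_prefix_cons.mpr ⟨rfl, hpre⟩)
                (by rw [pvPIdx_cons, ← mul_assoc]; exact hprod)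
              simpa using this
          by_cases h1 : pvDfs nums target d (t + 1) sel value = true
          · rw [if_pos h1]
          · rw [if_neg (by simpa using h1), if_pos h2]
        · have hit : i < t := by
            have := (hb t (by simp)).1
            omega
          have h1 : pvDfs nums target d (i + 1) sel value = true := by
            refine ih (i + 1) sel value (t :: T') (by omega) (by omega) hp ?_ hv hH
            intro t' ht'
            rcases List.mem_cons.mp ht' with rfl | ht''
            · exact ⟨by omega, (hb t' (by simp)).2⟩
            · have := hpt t' ht''
              have := hb t' (by simp [ht''])
              omega
          rw [if_pos h1]

theorem mem_pvProds (arr : List Int) (x : Int) :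
    x ∈ pvProds arr ↔ ∃ S : List Int, S.Sublist arr ∧ S.prod = x := by
  induction arr using List.reverseRecOn generalizing x with
  | nil =>
    constructor
    · intro h
      simp only [pvProds, List.foldl_nil] at h
      have hx : x = 1 := by simpa [PySem.Set.mem_ofList] using h
      exact ⟨[], by simp, by simp [hx]⟩
    · rintro ⟨S, hS, hprod⟩
      rw [List.sublist_nil] at hS; subst hS
      simp only [pvProds, List.foldl_nil]
      simp [PySem.Set.mem_ofList, ← hprod]
  | append_singleton arr v ih =>
    have hstep : pvProds (arr ++ [v])
        = (pvProds arr).foldl (fun acc p => PySem.Set.add acc (p * v)) (pvProds arr) := by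
      simp [pvProds, List.foldl_append]
    rw [hstep, PySem.Set.mem_foldl_add]
    constructor
    · rintro (h | ⟨p, hp, rfl⟩)
      · obtain ⟨S, hS, hprod⟩ := (ih _).mp h
        exact ⟨S, hS.trans (List.sublist_append_left _ _), hprod⟩
      · obtain ⟨S, hS, rfl⟩ := (ih _).mp hp
        exact ⟨S ++ [v], hS.append (List.Sublist.refl _), by simp⟩
    · rintro ⟨S, hS, rfl⟩
      rcases List.sublist_append_iff.mp hS with ⟨l₁, l₂, rfl, h₁, h₂⟩
      rcases List.sublist_singleton.mp h₂ with rfl | rfl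
      · left; exact (ih _).mpr ⟨l₁, h₁, by simp⟩
      · right; exact ⟨l₁.prod, (ih _).mpr ⟨l₁, h₁, rfl⟩, by simp⟩

theorem pvAlt_iff (nums : List Int) (target : Int) (h0 : target ≠ 0) :
    checkEqualPartitions_alt nums target = true ↔
      (nums.prod = target * target ∧ ∃ S : List Int, S.Sublist nums ∧ S.prod = target) := by
  have hfold : nums.foldl (· * ·) 1 = nums.prod := List.prod_eq_foldl.symm
  by_cases htot : nums.prod = target * target
  · have hz : ∀ x ∈ nums, x ≠ 0 := by
      intro x hx h
      have h0' : nums.prod = 0 := List.prod_eq_zero_iff.mpr (h ▸ hx)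
      rw [htot] at h0'
      exact h0 (mul_self_eq_zero.mp h0')
    simp only [checkEqualPartitions_alt, hfold, htot, h0, bne_self_eq_false, beq_iff_eq,
      if_false, Bool.false_eq_true, if_neg]
    rw [PySem.List.slice_to_natCast, PySem.List.slice_from_natCast, List.any_eq_true]
    constructor
    · rintro ⟨l, hl, hpred⟩
      simp only [Bool.and_eq_true, bne_iff_ne, beq_iff_eq, ne_eq] at hpred
      obtain ⟨⟨hl0, hmod⟩, hcont⟩ := hpred
      have hfd : (PySem.Int.floordiv target l) ∈ pvProds (nums.drop (nums.length / 2)) :=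
        (PySem.Set.contains_iff _ _).mp hcont
      obtain ⟨S₁, hS₁, hp₁⟩ := (mem_pvProds _ _).mp hl
      obtain ⟨S₂, hS₂, hp₂⟩ := (mem_pvProds _ _).mp hfd
      refine ⟨trivial, S₁ ++ S₂, ?_, ?_⟩
      · have := hS₁.append hS₂
        rwa [List.take_append_drop] at this
      · have := PySem.Int.floordiv_mul_add_mod target l
        rw [hmod, add_zero] at this
        rw [List.prod_append, hp₁, hp₂, mul_comm]
        exact this
    · rintro ⟨-, S, hS, hprod⟩
      rw [← List.take_append_drop (nums.length / 2) nums] at hS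
      rcases List.sublist_append_iff.mp hS with ⟨S₁, S₂, rfl, h₁, h₂⟩
      rw [List.prod_append] at hprod
      have hl0 : S₁.prod ≠ 0 := by
        intro h
        obtain hx := List.prod_eq_zero_iff.mp h
        exact hz _ (List.take_subset _ _ (h₁.subset hx)) rfl
      have hdvd : S₁.prod ∣ target := ⟨S₂.prod, hprod.symm⟩
      have hmod : PySem.Int.mod target S₁.prod = 0 :=
        (PySem.Int.mod_eq_zero_iff_dvd _ _).mpr hdvd
      have hfd : PySem.Int.floordiv target S₁.prod = S₂.prod := by
        have h2 := PySem.Int.floordiv_mul_add_mod target S₁.prod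
        rw [hmod, add_zero] at h2
        apply mul_right_cancel₀ hl0
        rw [h2, ← hprod, mul_comm]
      refine ⟨S₁.prod, (mem_pvProds _ _).mpr ⟨S₁, h₁, rfl⟩, ?_⟩
      simp only [Bool.and_eq_true, bne_iff_ne, beq_iff_eq, ne_eq]
      refine ⟨⟨hl0, hmod⟩, ?_⟩
      rw [hfd]
      exact (PySem.Set.contains_iff _ _).mpr ((mem_pvProds _ _).mpr ⟨S₂, h₂, rfl⟩)
  · have hfalse : checkEqualPartitions_alt nums target = false := by
      simp only [checkEqualPartitions_alt, hfold]
      rw [if_neg (by simpa using h0), if_pos (by simpa using htot)]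
    rw [hfalse]
    simp [htot]

theorem pvCount_two_iff (nums : List Int) :
    2 ≤ nums.count 0 ↔ ∃ p q : Nat, p < q ∧ q < nums.length ∧
      nums.getD p 0 = 0 ∧ nums.getD q 0 = 0 := by
  constructor
  · intro h
    have hdup : [(0 : Int), 0].Sublist nums :=
      List.duplicate_iff_sublist.mp (List.duplicate_iff_two_le_count.mpr h)
    obtain ⟨T, hp, hb, hm⟩ := pv_sublist_idx nums _ hdup
    have hlen : T.length = 2 := by
      have := congrArg List.length hm
      simpa using this
    obtain ⟨p, q, rfl⟩ := List.length_eq_two.mp hlen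
    have hpq : p < q := by
      have := List.pairwise_cons.mp hp
      exact this.1 q (by simp)
    have h1 : nums.getD p 0 = 0 := by simpa using congrArg (fun l => l.getD 0 0) hm
    have h2 : nums.getD q 0 = 0 := by simpa using congrArg (fun l => l.getD 1 0) hm
    exact ⟨p, q, hpq, hb q (by simp), h1, h2⟩
  · rintro ⟨p, q, hpq, hq, hp0, hq0⟩
    have hsub := pv_idx_sublist nums [p, q] (by simp [hpq])
      (by intro j hj; simp at hj; rcases hj with rfl | rfl <;> omega)
    rw [List.map_cons, List.map_cons, List.map_nil, hp0, hq0] at hsub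
    exact List.duplicate_iff_two_le_count.mp (List.duplicate_iff_sublist.mpr hsub)

theorem pvA_run (nums : List Int) (target : Int) (h0 : target ≠ 0)
    (htot : nums.prod = target * target) (hne : nums ≠ [])
    (T : List Nat) (hp : T.Pairwise (· < ·)) (hb : ∀ t ∈ T, t + 1 < nums.length)
    (hpi : pvPIdx nums T = target) :
    checkEqualPartitions nums target = true := by
  unfold checkEqualPartitions
  refine pvDfs_complete nums target nums.length 0 [] 1 T rfl
    (List.length_pos_iff.mpr hne) hp (fun t ht => ⟨Nat.zero_le _, hb t ht⟩)
    (by rw [one_mul]; exact hpi) ?_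
  intro T₁ hpre hprod
  rw [List.nil_append, pvCres_iff]
  have hsub := hpre.sublist
  have hp₁ : T₁.Pairwise (· < ·) := List.Pairwise.sublist hsub hp
  have hb₁ : ∀ j ∈ T₁, j < nums.length := by
    intro j hj
    have := hb j (hsub.subset hj)
    omega
  have hnd : T₁.Nodup := hp₁.imp (fun h => Nat.ne_of_lt h)
  have hsplit := pv_prod_split nums T₁ hnd hb₁
  rw [one_mul] at hprod
  rw [hprod, htot] at hsplit
  exact mul_left_cancel₀ h0 hsplit

theorem pvA_iff_ne (nums : List Int) (target : Int) (hne : nums ≠ []) (h0 : target ≠ 0) :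
    checkEqualPartitions nums target = true ↔
      (nums.prod = target * target ∧ ∃ S : List Int, S.Sublist nums ∧ S.prod = target) := by
  constructor
  · intro h
    obtain ⟨sel', hp, hln, hpi, hpc⟩ :=
      pvDfs_sound nums target nums.length 0 [] 1 rfl (by simp) (by simp) (by simp) rfl h
    have hnd : sel'.Nodup := hp.imp (fun h => Nat.ne_of_lt h)
    have hsplit := pv_prod_split nums sel' hnd hln
    rw [hpi, hpc] at hsplit
    exact ⟨hsplit.symm, sel'.map (fun j => nums.getD j 0), pv_idx_sublist nums sel' hp hln, hpi⟩
  · rintro ⟨htot, S, hS, hprod⟩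
    obtain ⟨T, hTp, hTb, hTm⟩ := pv_sublist_idx nums S hS
    have hTpi : pvPIdx nums T = target := by rw [pvPIdx, hTm]; exact hprod
    have hTnd : T.Nodup := hTp.imp (fun h => Nat.ne_of_lt h)
    by_cases hmem : (nums.length - 1) ∈ T
    · -- use the complement, which avoids the last index
      have hCp : (pvCompl nums T).Pairwise (· < ·) := by
        unfold pvCompl
        exact List.Pairwise.sublist List.filter_sublist List.pairwise_lt_range
      have hCb : ∀ t ∈ pvCompl nums T, t + 1 < nums.length := by
        intro t ht
        have h1 := List.mem_filter.mp ht
        have h2 : t < nums.length := List.mem_range.mp h1.1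
        have h3 : t ∉ T := by simpa using h1.2
        have h4 : t ≠ nums.length - 1 := fun h => h3 (h ▸ hmem)
        omega
      have hCpi : pvPIdx nums (pvCompl nums T) = target := by
        have hsplit := pv_prod_split nums T hTnd hTb
        rw [hTpi, htot] at hsplit
        exact mul_left_cancel₀ h0 hsplit
      exact pvA_run nums target h0 htot hne _ hCp hCb hCpi
    · have hTb' : ∀ t ∈ T, t + 1 < nums.length := by
        intro t ht
        have h1 := hTb t ht
        have h2 : t ≠ nums.length - 1 := fun h => hmem (h ▸ ht)
        omega
      exact pvA_run nums target h0 htot hne T hTp hTb' hTpi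

theorem pvA_iff_zero (nums : List Int) (hne : nums ≠ []) :
    checkEqualPartitions nums 0 = true ↔ 2 ≤ nums.count 0 := by
  constructor
  · intro h
    obtain ⟨sel', hp, hln, hpi, hpc⟩ :=
      pvDfs_sound nums 0 nums.length 0 [] 1 rfl (by simp) (by simp) (by simp) rfl h
    obtain ⟨z₁, hz₁, hz₁0⟩ : ∃ j ∈ sel', nums.getD j 0 = 0 := by
      have := List.prod_eq_zero_iff.mp hpi
      simpa [pvPIdx, eq_comm] using this
    obtain ⟨z₂, hz₂, hz₂0⟩ : ∃ j ∈ pvCompl nums sel', nums.getD j 0 = 0 := by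
      have := List.prod_eq_zero_iff.mp hpc
      simpa [pvPIdx, eq_comm] using this
    have hz₂n : z₂ < nums.length := List.mem_range.mp (List.mem_filter.mp hz₂).1
    have hz₂m : z₂ ∉ sel' := by simpa using (List.mem_filter.mp hz₂).2
    have hz₁n : z₁ < nums.length := hln z₁ hz₁
    have hne12 : z₁ ≠ z₂ := fun h => hz₂m (h ▸ hz₁)
    rw [pvCount_two_iff]
    rcases Nat.lt_or_ge z₁ z₂ with hlt | hge
    · exact ⟨z₁, z₂, hlt, hz₂n, hz₁0, hz₂0⟩
    · exact ⟨z₂, z₁, by omega, hz₁n, hz₂0, hz₁0⟩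
  · intro h
    obtain ⟨p, q, hpq, hq, hp0, hq0⟩ := (pvCount_two_iff nums).mp h
    unfold checkEqualPartitions
    refine pvDfs_complete nums 0 nums.length 0 [] 1 [p] rfl
      (List.length_pos_iff.mpr hne) (by simp) (by intro t ht; simp at ht; omega)
      (by rw [pvPIdx_cons]
          simp only [pvPIdx, List.map_nil, List.prod_nil, mul_one, one_mul]
          exact hp0) ?_
    intro T₁ hpre hprod
    rcases List.sublist_singleton.mp hpre.sublist with rfl | rfl
    · exfalso
      simp [pvPIdx] at hprod
    · rw [List.nil_append, pvCres_iff]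
      apply List.prod_eq_zero_iff.mpr
      simp only [pvPIdx, List.mem_map]
      refine ⟨q, ?_, hq0⟩
      rw [pvCompl, List.mem_filter]
      constructor
      · exact List.mem_range.mpr hq
      · simp
        omega

-- ===== VERDICT (by name: the statement is the Claim_ definition above) =====
theorem checkEqualPartitions_spec : Claim_equal_checkEqualPartitions := by
  intro nums target _ hpre
  unfold Spec_checkEqualPartitions
  by_cases hnil : nums = []
  · subst hnil
    have ht : target ≠ 1 := by
      rcases hpre with h | h
      · exact absurd rfl h
      · exact h
    have hA : checkEqualPartitions [] target = false := rfl
    rw [hA]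
    by_cases ht0 : target = 0
    · subst ht0; rfl
    · by_cases h1 : target * target = 1
      · have : target = 1 ∨ target = -1 := mul_self_eq_one_iff.mp h1
        rcases this with h | h
        · exact absurd h ht
        · subst h; rfl
      · simp only [checkEqualPartitions_alt]
        rw [if_neg (by simpa using ht0), if_pos]
        simp only [List.foldl_nil]
        simpa using fun h => h1 h.symm
  · rw [Bool.eq_iff_iff]
    by_cases h0 : target = 0
    · subst h0
      rw [pvA_iff_zero nums hnil]
      simp [checkEqualPartitions_alt, PySem.List.count_eq]
    · rw [pvA_iff_ne nums target hnil h0, pvAlt_iff nums target h0]
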